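-- pv_equiv track=rewrite | github.com/limaximy/tbank_gui_for_fast_document_processing | algorithms.py | take_lists_ls_and_summa
-- ===== SOURCE A (Python) =====
-- def separation_na_stroki(mnogo_strok):
-- 	s_stroki = []
-- 	stroka = ''
-- 	flag = False
-- 	stop = 0
-- 	for i in range(len(mnogo_strok)-4):
-- 		if mnogo_strok[i:i+4] == 'null':
-- 			flag = True
-- 		if mnogo_strok[i] == '\n':
-- 			if flag == False:
-- 				s_stroki.append(stroka + "  ")
-- 			stroka = ''
-- 			flag = False
-- 			stop = i + 1
-- 		else:
-- 			stroka = stroka + mnogo_strok[i]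
--
-- 	if mnogo_strok[stop:].find('null') == -1:
-- 		s_stroki.append(mnogo_strok[stop:] + "  ")
-- 	return s_stroki
--
-- def take_lists_ls_and_summa(mnogo_strok):
-- 	s_stroki = separation_na_stroki(mnogo_strok)
-- 	ls = []
-- 	summa = []
-- 	for j in range(len(s_stroki)):
-- 		s = s_stroki[j]
-- 		stage = 0
-- 		element = ''
-- 		flag_num = False
-- 		for i in range(len(s)):
-- 			if flag_num == False and element != '':
-- 				if stage == 0:
-- 					ls.append(element)
-- 					element = ''
-- 					stage = 1
-- 				elif stage == 1:
-- 					summa.append(element)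
-- 					element = ''
-- 					stage = 0
--
-- 			if s[i].isdigit() == True or s[i] == '.' or s[i] == '-':
-- 				flag_num = True
-- 				element = element + s[i]
-- 			else:
-- 				flag_num = False
-- 	return ls, summa
-- ===== SOURCE B (Python) =====
-- def separation_na_stroki(mnogo_strok):
-- 	s_stroki = []
-- 	stroka = ''
-- 	flag = False
-- 	stop = 0
-- 	for i in range(len(mnogo_strok)-4):
-- 		if mnogo_strok[i:i+4] == 'null':
-- 			flag = True
-- 		if mnogo_strok[i] == '\n':
-- 			if flag == False:
-- 				s_stroki.append(stroka + "  ")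
-- 			stroka = ''
-- 			flag = False
-- 			stop = i + 1
-- 		else:
-- 			stroka = stroka + mnogo_strok[i]
--
-- 	if mnogo_strok[stop:].find('null') == -1:
-- 		s_stroki.append(mnogo_strok[stop:] + "  ")
-- 	return s_stroki
--
-- def _numeric_runs(s):
-- 	"""Maximal runs of characters from [0-9.-] in s, left to right."""
-- 	runs = []
-- 	i, n = 0, len(s)
-- 	while i < n:
-- 		if s[i].isdigit() or s[i] == '.' or s[i] == '-':
-- 			j = i
-- 			while j < n and (s[j].isdigit() or s[j] == '.' or s[j] == '-'):
-- 				j += 1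
-- 			runs.append(s[i:j])
-- 			i = j
-- 		else:
-- 			i += 1
-- 	return runs
--
-- def take_lists_ls_and_summa(mnogo_strok):
-- 	ls = []
-- 	summa = []
-- 	for line in separation_na_stroki(mnogo_strok):
-- 		for idx, tok in enumerate(_numeric_runs(line)):
-- 			if idx % 2 == 0:
-- 				ls.append(tok)
-- 			else:
-- 				summa.append(tok)
-- 	return ls, summa
-- ===== Notes on version B (the rewrite author's own statement) =====
-- stated objective: simpler
-- what changed: A's per-character state machine with a delayed flush (flag_num/element/stage) is replaced by extracting each line's maximal numeric-character runs as whole tokens and distributing them to ls/summa by index parity.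
import Mathlib
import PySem

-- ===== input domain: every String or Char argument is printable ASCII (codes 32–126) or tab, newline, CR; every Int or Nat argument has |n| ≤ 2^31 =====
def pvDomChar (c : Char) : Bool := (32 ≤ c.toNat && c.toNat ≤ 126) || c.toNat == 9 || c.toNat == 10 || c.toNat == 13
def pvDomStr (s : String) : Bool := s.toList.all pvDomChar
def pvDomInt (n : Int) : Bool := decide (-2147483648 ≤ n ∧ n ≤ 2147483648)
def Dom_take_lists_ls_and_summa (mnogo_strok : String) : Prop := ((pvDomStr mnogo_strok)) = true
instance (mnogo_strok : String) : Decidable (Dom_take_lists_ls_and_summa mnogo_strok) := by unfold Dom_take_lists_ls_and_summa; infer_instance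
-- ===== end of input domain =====

-- B replaces A's delayed-flush character state machine by extracting each line's maximal
-- numeric runs as whole tokens and distributing them to ls/summa by index parity (objective: simpler).

-- shared character test: s[i].isdigit() or s[i] == '.' or s[i] == '-'  (both Pythons use this test verbatim)
def pvIsNum (c : Char) : Bool := PySem.Chars.isdigit c || c == '.' || c == '-'

-- shared helper separation_na_stroki (byte-identical in Source A and Source B); lines kept as List Char.
-- pyGetD is exact here: i ranges over pyRange 0 (len-4) 1, hence 0 ≤ i < len.
def pySeparation (mnogo_strok : String) : List (List Char) :=
  let cs := mnogo_strok.toList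
  let st := (PySem.List.pyRange 0 ((cs.length : Int) - 4) 1).foldl
    (fun (st : List (List Char) × List Char × Bool × Int) i =>
      let s_stroki := st.1
      let stroka := st.2.1
      let flag := st.2.2.1
      let stop := st.2.2.2
      let flag := if PySem.List.slice cs (some i) (some (i + 4)) = ['n','u','l','l'] then true else flag
      if PySem.List.pyGetD cs i ' ' = '\n' then
        ((if flag = false then s_stroki ++ [stroka ++ [' ',' ']] else s_stroki), [], false, i + 1)
      else
        (s_stroki, stroka ++ [PySem.List.pyGetD cs i ' '], flag, stop))
    ([], [], false, 0)
  let tail := PySem.List.slice cs (some st.2.2.2) none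
  if PySem.Chars.find tail ['n','u','l','l'] = -1 then st.1 ++ [tail ++ [' ',' ']] else st.1

-- ===== PORT A =====
-- A's inner-loop body: state (ls, summa, stage, element, flag_num), one character step.
def stepA (st : List String × List String × Int × List Char × Bool) (c : Char) :
    List String × List String × Int × List Char × Bool :=
  let ls := st.1
  let summa := st.2.1
  let stage := st.2.2.1
  let element := st.2.2.2.1
  let flag := st.2.2.2.2
  let fl :=
    if flag = false ∧ element ≠ [] then
      if stage = 0 then (ls ++ [String.mk element], summa, (1 : Int), ([] : List Char))
      else if stage = 1 then (ls, summa ++ [String.mk element], (0 : Int), ([] : List Char))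
      else (ls, summa, stage, element)
    else (ls, summa, stage, element)
  if pvIsNum c then (fl.1, fl.2.1, fl.2.2.1, fl.2.2.2 ++ [c], true)
  else (fl.1, fl.2.1, fl.2.2.1, fl.2.2.2, false)

def take_lists_ls_and_summa (mnogo_strok : String) : List String × List String :=
  (pySeparation mnogo_strok).foldl
    (fun acc s =>
      let r := s.foldl stepA (acc.1, acc.2, 0, [], false)
      (r.1, r.2.1))
    ([], [])

-- ===== PORT B =====
-- Source B's _numeric_runs: maximal runs of pvIsNum characters, left to right.
def pvRuns : List Char → List String
  | [] => []
  | c :: rest =>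
    if pvIsNum c then
      String.mk (c :: rest.takeWhile pvIsNum) :: pvRuns (rest.dropWhile pvIsNum)
    else pvRuns rest
termination_by cs => cs.length
decreasing_by
  all_goals have := List.length_dropWhile_le pvIsNum rest
  all_goals simp
  all_goals assumption

def take_lists_ls_and_summa_alt (mnogo_strok : String) : List String × List String :=
  (pySeparation mnogo_strok).foldl
    (fun acc s =>
      (PySem.List.enumerate (pvRuns s) 0).foldl
        (fun (acc : List String × List String) it =>
          if PySem.Int.mod it.1 2 = 0 then (acc.1 ++ [it.2], acc.2) else (acc.1, acc.2 ++ [it.2]))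
        acc)
    ([], [])

-- ===== PRECONDITION & SPEC =====
def Spec_take_lists_ls_and_summa (mnogo_strok : String) (out : List String × List String) : Prop := out = take_lists_ls_and_summa_alt mnogo_strok
instance (mnogo_strok : String) (out : List String × List String) : Decidable (Spec_take_lists_ls_and_summa mnogo_strok out) := by unfold Spec_take_lists_ls_and_summa; infer_instance

-- ===== CLAIM (what is proved, stated in full; the proofs are below) =====
def Claim_equal_take_lists_ls_and_summa : Prop := ∀ (mnogo_strok : String), Dom_take_lists_ls_and_summa mnogo_strok → Spec_take_lists_ls_and_summa mnogo_strok (take_lists_ls_and_summa mnogo_strok)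

-- ===== LEMMAS AND PROOFS =====

-- canonical alternating distribution of a token list, starting at stage (0 = ls side)
def pvEmit : Int → List String → List String → List String → List String × List String
  | _, ls, summa, [] => (ls, summa)
  | stage, ls, summa, t :: ts =>
    if stage = 0 then pvEmit 1 (ls ++ [t]) summa ts else pvEmit 0 ls (summa ++ [t]) ts

-- "no numeric character among the last two characters"
def pvTailOK (cs : List Char) : Prop := ∀ c ∈ cs.drop (cs.length - 2), pvIsNum c = false

lemma pv_mem_drop {α} (l : List α) (k i : ℕ) (hk : k ≤ i) (hi : i < l.length) :
    l[i] ∈ l.drop k := by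
  have hj : i - k < (l.drop k).length := by simp; omega
  have : (l.drop k)[i - k] = l[i] := by
    rw [List.getElem_drop]; congr 1; omega
  rw [← this]; exact List.getElem_mem hj

lemma pvTailOK_suffix {ds cs : List Char} (h : ds <:+ cs) (hcs : pvTailOK cs) : pvTailOK ds := by
  obtain ⟨t, rfl⟩ := h
  intro c hc
  rw [List.mem_iff_getElem] at hc
  obtain ⟨j, hj, rfl⟩ := hc
  rw [List.getElem_drop]
  have hlen : ds.length - 2 + j < ds.length := by
    simp [List.length_drop] at hj; omega
  have hidx : (ds.length - 2 + j) + t.length < (t ++ ds).length := by simp; omega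
  have hget : ds[ds.length - 2 + j] = (t ++ ds)[t.length + (ds.length - 2 + j)]'(by simp; omega) := by
    rw [List.getElem_append_right] <;> simp <;> omega
  rw [hget]
  apply hcs
  apply pv_mem_drop
  all_goals simp [List.length_drop] at hj ⊢
  all_goals omega

lemma pv_consume (ks : List Char) (hk : ∀ c ∈ ks, pvIsNum c = true) :
    ∀ ls summa stage e, ks.foldl stepA (ls, summa, stage, e, true) = (ls, summa, stage, e ++ ks, true) := by
  induction ks with
  | nil => intro ls summa stage e; simp
  | cons c ks ih =>
    intro ls summa stage e
    have hc : pvIsNum c = true := hk c (by simp)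
    simp only [List.foldl_cons]
    have hstep : stepA (ls, summa, stage, e, true) c = (ls, summa, stage, e ++ [c], true) := by
      simp [stepA, hc]
    rw [hstep, ih (fun c hc' => hk c (by simp [hc']))]
    simp

-- A's per-line machine computes exactly the alternating distribution of the line's maximal runs.
lemma pv_machine_eq_emit :
    ∀ n (cs : List Char), cs.length ≤ n → pvTailOK cs →
      ∀ ls summa stage, (stage = 0 ∨ stage = 1) →
        (let r := cs.foldl stepA (ls, summa, stage, [], false); (r.1, r.2.1)) =
          pvEmit stage ls summa (pvRuns cs) := by
  intro n
  induction n with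
  | zero =>
    intro cs hlen _ ls summa stage _
    have : cs = [] := List.length_eq_zero_iff.mp (Nat.le_zero.mp hlen)
    subst this; simp [pvRuns, pvEmit]
  | succ n ih =>
    intro cs hlen htail ls summa stage hstage
    match cs with
    | [] => simp [pvRuns, pvEmit]
    | c :: rest =>
      by_cases hc : pvIsNum c = true
      · -- a maximal run starts here
        set k := rest.takeWhile pvIsNum with hkdef
        set rest' := rest.dropWhile pvIsNum with hrdef
        have hsplit : rest = k ++ rest' := (List.takeWhile_append_dropWhile (p := pvIsNum) (l := rest)).symm
        have hkall : ∀ x ∈ k, pvIsNum x = true := fun x hx => List.mem_takeWhile_imp hx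
        -- the last two characters are non-numeric, so at least two characters follow the run
        have hr2 : 2 ≤ rest'.length := by
          by_contra hlt
          push_neg at hlt
          have hcs : c :: rest = (c :: k) ++ rest' := by rw [hsplit]; simp
          have htail' : pvTailOK ((c :: k) ++ rest') := by rw [← hcs]; exact htail
          have hlen2 : k.length < ((c :: k) ++ rest').length := by simp
          have helem_mem : ((c :: k) ++ rest')[k.length]'hlen2 ∈ (c :: k) := by
            rw [List.getElem_append_left (by simp : k.length < (c :: k).length)]
            exact List.getElem_mem _
          have hall : ∀ x ∈ c :: k, pvIsNum x = true := by
            intro x hx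
            rcases List.mem_cons.mp hx with h | h
            · rw [h]; exact hc
            · exact hkall x h
          have hnum := hall _ helem_mem
          have hfalse := htail' _
            (pv_mem_drop _ (((c :: k) ++ rest').length - 2) k.length (by simp; omega) hlen2)
          rw [hnum] at hfalse
          simp at hfalse
        obtain ⟨d, rest'', hd⟩ := List.exists_cons_of_ne_nil
          (show rest' ≠ [] by intro h; rw [h] at hr2; simp at hr2)
        obtain ⟨e, rest3, he⟩ := List.exists_cons_of_ne_nil
          (show rest'' ≠ [] by intro h; rw [hd, h] at hr2; simp at hr2)
        have hdnum : pvIsNum d = false := by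
          have h1 : rest.dropWhile pvIsNum = d :: rest'' := by rw [← hrdef, hd]
          have hne : rest.dropWhile pvIsNum ≠ [] := by rw [h1]; simp
          have h2 := List.head_dropWhile_not pvIsNum hne
          simp only [h1, List.head_cons] at h2
          exact h2
        -- run the machine over the run, the terminator d, and the flush step at e
        have hstep0 : stepA (ls, summa, stage, ([] : List Char), false) c =
            (ls, summa, stage, [c], true) := by simp [stepA, hc]
        have hstepd : stepA (ls, summa, stage, c :: k, true) d =
            (ls, summa, stage, c :: k, false) := by simp [stepA, hdnum]
        have hflush : ∃ ls' summa' stage', (stage' = 0 ∨ stage' = 1) ∧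
            stepA (ls, summa, stage, c :: k, false) e = stepA (ls', summa', stage', [], false) e ∧
            pvEmit stage ls summa (String.mk (c :: k) :: pvRuns (e :: rest3)) =
              pvEmit stage' ls' summa' (pvRuns (e :: rest3)) := by
          rcases hstage with h0 | h1
          · refine ⟨ls ++ [String.mk (c :: k)], summa, 1, Or.inr rfl, ?_, ?_⟩
            · subst h0; simp [stepA]
            · subst h0; simp [pvEmit]
          · refine ⟨ls, summa ++ [String.mk (c :: k)], 0, Or.inl rfl, ?_, ?_⟩
            · subst h1; simp [stepA]
            · subst h1; simp [pvEmit]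
        obtain ⟨ls', summa', stage', hstage', hstepe, hemit⟩ := hflush
        have hruns : pvRuns (c :: rest) = String.mk (c :: k) :: pvRuns (e :: rest3) := by
          rw [pvRuns]
          rw [if_pos hc, ← hkdef, ← hrdef, hd, he]
          congr 1
          rw [pvRuns, if_neg (by simp [hdnum])]
        have htail3 : pvTailOK (e :: rest3) := by
          apply pvTailOK_suffix _ htail
          refine ⟨c :: k ++ [d], ?_⟩
          rw [hsplit, hd, he]; simp
        have hlen3 : (e :: rest3).length ≤ n := by
          have : rest.length = k.length + rest'.length := by rw [hsplit]; simp
          rw [hd, he] at this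
          simp at hlen this ⊢
          omega
        calc (let r := (c :: rest).foldl stepA (ls, summa, stage, [], false); (r.1, r.2.1))
            = (let r := (e :: rest3).foldl stepA (ls', summa', stage', [], false); (r.1, r.2.1)) := by
              simp only [List.foldl_cons, hstep0]
              rw [hsplit, hd, he]
              rw [List.foldl_append, pv_consume k hkall]
              simp only [List.foldl_cons, List.singleton_append, hstepd, hstepe]
          _ = pvEmit stage' ls' summa' (pvRuns (e :: rest3)) := ih _ hlen3 htail3 _ _ _ hstage'
          _ = pvEmit stage ls summa (pvRuns (c :: rest)) := by rw [hruns, hemit]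
      · -- non-numeric head: state is unchanged, recurse
        have hstep : stepA (ls, summa, stage, ([] : List Char), false) c =
            (ls, summa, stage, [], false) := by simp [stepA, hc]
        have htail' : pvTailOK rest := pvTailOK_suffix ⟨[c], rfl⟩ htail
        have hruns : pvRuns (c :: rest) = pvRuns rest := by rw [pvRuns, if_neg (by simp [hc])]
        simp only [List.foldl_cons, hstep, hruns]
        exact ih rest (by simpa using Nat.lt_succ_iff.mp (by simpa using hlen)) htail' ls summa stage hstage

-- B's enumerate-parity fold is the same alternating distribution.
lemma pv_enum_eq_emit (toks : List String) :
    ∀ (m : ℕ) (ls summa : List String),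
      (PySem.List.enumerate toks (m : Int)).foldl
        (fun (acc : List String × List String) it =>
          if PySem.Int.mod it.1 2 = 0 then (acc.1 ++ [it.2], acc.2) else (acc.1, acc.2 ++ [it.2]))
        (ls, summa) = pvEmit ((m : Int) % 2) ls summa toks := by
  induction toks with
  | nil => intro m ls summa; simp [PySem.List.enumerate_nil, pvEmit]
  | cons t ts ih =>
    intro m ls summa
    rw [PySem.List.enumerate_cons]
    simp only [List.foldl_cons]
    have hcast : (m : Int) + 1 = ((m + 1 : ℕ) : Int) := by push_cast; ring
    have hmod : PySem.Int.mod (m : Int) 2 = ((m % 2 : ℕ) : Int) := PySem.Int.mod_natCast m 2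
    rcases Nat.mod_two_eq_zero_or_one m with hm | hm
    · have h2 : (m : Int) % 2 = 0 := by omega
      have h3 : ((m + 1 : ℕ) : Int) % 2 = 1 := by push_cast; omega
      rw [hmod, hm]
      simp only [Nat.cast_zero, if_pos rfl]
      rw [hcast, ih (m + 1), h3, h2, pvEmit]
      simp
    · have h2 : (m : Int) % 2 = 1 := by omega
      have h3 : ((m + 1 : ℕ) : Int) % 2 = 0 := by push_cast; omega
      rw [hmod, hm]
      simp only [Nat.cast_one, if_neg (by decide : ¬ (1 : Int) = 0)]
      rw [hcast, ih (m + 1), h3, h2, pvEmit]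
      simp

-- every line produced by separation_na_stroki ends in two spaces
lemma pv_sep_ends (mnogo_strok : String) :
    ∀ x ∈ pySeparation mnogo_strok, ∃ ds, x = ds ++ [' ',' '] := by
  unfold pySeparation
  set cs := mnogo_strok.toList
  set f := fun (st : List (List Char) × List Char × Bool × Int) (i : Int) =>
      let s_stroki := st.1
      let stroka := st.2.1
      let flag := st.2.2.1
      let stop := st.2.2.2
      let flag := if PySem.List.slice cs (some i) (some (i + 4)) = ['n','u','l','l'] then true else flag
      if PySem.List.pyGetD cs i ' ' = '\n' then
        ((if flag = false then s_stroki ++ [stroka ++ [' ',' ']] else s_stroki), ([] : List Char), false, i + 1)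
      else
        (s_stroki, stroka ++ [PySem.List.pyGetD cs i ' '], flag, stop) with hf
  have hinv : ∀ x ∈ ((PySem.List.pyRange 0 ((cs.length : Int) - 4) 1).foldl f ([], [], false, 0)).1,
      ∃ ds, x = ds ++ [' ',' '] := by
    apply List.foldlRecOn (motive := fun st : List (List Char) × List Char × Bool × Int =>
      ∀ x ∈ st.1, ∃ ds, x = ds ++ [' ',' '])
    · intro x hx; simp at hx
    · intro st hst i _ x hx
      rw [hf] at hx
      dsimp only at hx
      split_ifs at hx <;> (try simp only [List.mem_append, List.mem_singleton] at hx) <;>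
        first
          | exact hst x hx
          | (rcases hx with h | h
             · exact hst x h
             · exact ⟨st.2.1, h⟩)
  intro x hx
  dsimp only at hx
  split_ifs at hx <;> (try simp only [List.mem_append, List.mem_singleton] at hx)
  · rcases hx with h | h
    · exact hinv x h
    · exact ⟨_, h⟩
  · exact hinv x hx

lemma pv_tailOK_of_ends {x : List Char} (h : ∃ ds, x = ds ++ [' ',' ']) : pvTailOK x := by
  obtain ⟨ds, rfl⟩ := h
  intro c hc
  have : (ds ++ [' ',' ']).length - 2 = ds.length := by simp
  rw [this] at hc
  rw [List.drop_left] at hc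
  simp at hc
  subst hc
  decide

lemma pv_line_eq (s : List Char) (hs : ∃ ds, s = ds ++ [' ',' ']) (acc : List String × List String) :
    (let r := s.foldl stepA (acc.1, acc.2, 0, [], false); (r.1, r.2.1)) =
      (PySem.List.enumerate (pvRuns s) 0).foldl
        (fun (acc : List String × List String) it =>
          if PySem.Int.mod it.1 2 = 0 then (acc.1 ++ [it.2], acc.2) else (acc.1, acc.2 ++ [it.2]))
        acc := by
  have h1 := pv_machine_eq_emit s.length s le_rfl (pv_tailOK_of_ends hs) acc.1 acc.2 0 (Or.inl rfl)
  have h2 := pv_enum_eq_emit (pvRuns s) 0 acc.1 acc.2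
  simp only [Nat.cast_zero] at h2
  rw [h1]
  rw [show ((0 : Int) % 2) = 0 by decide] at h2
  rw [← h2]

-- ===== VERDICT (by name: the statement is the Claim_ definition above) =====
theorem take_lists_ls_and_summa_spec : Claim_equal_take_lists_ls_and_summa := by
  intro mnogo_strok _
  unfold Spec_take_lists_ls_and_summa take_lists_ls_and_summa take_lists_ls_and_summa_alt
  apply PySem.List.foldl_congr_mem
  intro acc s hs
  exact pv_line_eq s (pv_sep_ends mnogo_strok s hs) acc
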